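-- pv_equiv track=rewrite | github.com/dangxuanvuong98/a_star_robot_in_maze | astar_heuristic.py | manhatan_with_bonus_and_cost
-- ===== SOURCE A (Python) =====
-- def manhatan_with_bonus_and_cost(size, state, destination, items, walls):
-- 	if (state[0][0] == destination[0] and state[0][1] == destination[1]):
-- 		return 0
-- 	bonus_amount = 0
-- 	for i in range(size[0]):
-- 		for j in range(size[1]):
-- 			bonus_amount += max(0, items[i][j] * ((state[1][i] >> j) & 1) - abs(i - state[0][0]) - abs(j - state[0][1]))
-- 	distance = abs(destination[0] - state[0][0]) + abs(destination[1] - state[0][1])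
-- 	return bonus_amount - distance
-- 	pass
-- ===== SOURCE B (Python) =====
-- def manhatan_with_bonus_and_cost(size, state, destination, items, walls):
-- 	# Staged build-sort-scan: collect the surplus (value minus distance) of every
-- 	# mask-set cell, sort the surpluses descending, and accumulate them with an
-- 	# early exit at the first non-positive one (all later ones are <= 0 too, and
-- 	# unset cells would contribute max(0, -dist) = 0, so the result is exact).
-- 	(r, c), masks = state
-- 	if r == destination[0] and c == destination[1]:
-- 		return 0
-- 	surpluses = [items[i][j] - abs(i - r) - abs(j - c)
-- 	             for i in range(size[0])
-- 	             for j in range(size[1])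
-- 	             if (masks[i] >> j) & 1]
-- 	surpluses.sort(reverse=True)
-- 	bonus = 0
-- 	for s in surpluses:
-- 		if s <= 0:
-- 			break
-- 		bonus += s
-- 	return bonus - abs(destination[0] - r) - abs(destination[1] - c)
-- ===== Notes on version B (the rewrite author's own statement) =====
-- stated objective: alternative
-- what changed: Instead of a single per-cell pass taking max(0, value*bit - distance), B works in stages: it builds the list of surpluses (item value minus Manhattan distance) of the mask-set cells, sorts it descending, and sums with an early break at the first non-positive surplus; sortedness makes the break exact and unset cells would only contribute max(0,-dist)=0.
import Mathlib
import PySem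

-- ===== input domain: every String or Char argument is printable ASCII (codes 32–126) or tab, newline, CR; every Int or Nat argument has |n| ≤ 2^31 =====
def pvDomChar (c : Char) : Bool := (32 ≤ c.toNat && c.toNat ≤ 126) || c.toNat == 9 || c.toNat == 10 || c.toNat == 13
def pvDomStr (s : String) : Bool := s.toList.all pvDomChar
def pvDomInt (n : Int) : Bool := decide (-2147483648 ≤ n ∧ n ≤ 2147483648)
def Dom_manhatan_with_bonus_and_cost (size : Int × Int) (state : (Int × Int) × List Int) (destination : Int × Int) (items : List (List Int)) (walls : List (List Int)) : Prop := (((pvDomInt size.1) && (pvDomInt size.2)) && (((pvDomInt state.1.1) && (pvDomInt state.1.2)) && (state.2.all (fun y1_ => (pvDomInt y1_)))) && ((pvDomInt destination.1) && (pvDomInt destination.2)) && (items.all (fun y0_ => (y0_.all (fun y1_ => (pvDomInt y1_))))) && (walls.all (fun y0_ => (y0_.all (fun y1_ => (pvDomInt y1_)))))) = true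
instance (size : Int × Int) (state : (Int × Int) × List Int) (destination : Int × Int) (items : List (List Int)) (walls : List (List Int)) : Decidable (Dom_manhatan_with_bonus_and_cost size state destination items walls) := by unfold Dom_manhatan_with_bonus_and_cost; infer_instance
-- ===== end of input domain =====

-- B replaces the per-cell max(0,·) pass by a staged build / sort-descending /
-- early-exit accumulation of the set-bit cells' surpluses; objective: alternative.

-- ===== PORT A =====
-- j comes from range(...) so j ≥ 0 and Python '(m >> j) & 1' is pvBit m j;
-- pyGetD is used under Pre_ (which excludes the IndexError inputs).
def pvBit (m j : Int) : Int := PySem.Int.band (m >>> j.toNat) 1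

def manhatan_with_bonus_and_cost (size : Int × Int) (state : (Int × Int) × List Int) (destination : Int × Int) (items : List (List Int)) (walls : List (List Int)) : Int :=
  if state.1.1 = destination.1 ∧ state.1.2 = destination.2 then 0
  else
    let bonus_amount : Int :=
      (PySem.List.pyRange 0 size.1 1).foldl (fun acc i =>
        (PySem.List.pyRange 0 size.2 1).foldl (fun acc2 j =>
          acc2 + max 0 (PySem.List.pyGetD (PySem.List.pyGetD items i []) j 0 *
              pvBit (PySem.List.pyGetD state.2 i 0) j
            - |i - state.1.1| - |j - state.1.2|)) acc) 0
    let distance : Int := |destination.1 - state.1.1| + |destination.2 - state.1.2|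
    bonus_amount - distance

-- ===== PORT B =====
-- the early-exit accumulation loop 'for s in surpluses: if s <= 0: break; bonus += s'
def pvSumPos : List Int → Int → Int
  | [], acc => acc
  | s :: t, acc => if s ≤ 0 then acc else pvSumPos t (acc + s)

def manhatan_with_bonus_and_cost_alt (size : Int × Int) (state : (Int × Int) × List Int) (destination : Int × Int) (items : List (List Int)) (walls : List (List Int)) : Int :=
  if state.1.1 = destination.1 ∧ state.1.2 = destination.2 then 0
  else
    let r := state.1.1
    let c := state.1.2
    -- the comprehension: surplus of every cell whose mask bit is set
    let surpluses : List Int :=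
      (PySem.List.pyRange 0 size.1 1).flatMap (fun i =>
        ((PySem.List.pyRange 0 size.2 1).filter (fun j =>
            pvBit (PySem.List.pyGetD state.2 i 0) j != 0)).map (fun j =>
          PySem.List.pyGetD (PySem.List.pyGetD items i []) j 0 - |i - r| - |j - c|))
    -- surpluses.sort(reverse=True)
    let sortedS := PySem.List.sorted surpluses (fun x => x) true
    pvSumPos sortedS 0 - |destination.1 - r| - |destination.2 - c|

-- ===== PRECONDITION & SPEC =====
-- Pre_ excludes exactly the inputs on which Python A raises IndexError
-- (items / state[1] / a needed row shorter than the scanned grid).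
def Pre_manhatan_with_bonus_and_cost (size : Int × Int) (state : (Int × Int) × List Int) (destination : Int × Int) (items : List (List Int)) (walls : List (List Int)) : Prop :=
  (state.1.1 = destination.1 ∧ state.1.2 = destination.2) ∨ size.1 ≤ 0 ∨ size.2 ≤ 0 ∨
  (size.1 ≤ (items.length : Int) ∧ size.1 ≤ (state.2.length : Int) ∧
    ∀ row ∈ items.take size.1.toNat, size.2 ≤ (row.length : Int))

instance (size : Int × Int) (state : (Int × Int) × List Int) (destination : Int × Int) (items : List (List Int)) (walls : List (List Int)) : Decidable (Pre_manhatan_with_bonus_and_cost size state destination items walls) := by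
  unfold Pre_manhatan_with_bonus_and_cost; infer_instance

def pvWitness_manhatan_with_bonus_and_cost : (Int × Int) × ((Int × Int) × List Int) × (Int × Int) × List (List Int) × List (List Int) :=
  ((2, 2), ((0, 0), [3, 1]), (1, 1), [[5, 5], [5, 5]], [])

def Spec_manhatan_with_bonus_and_cost (size : Int × Int) (state : (Int × Int) × List Int) (destination : Int × Int) (items : List (List Int)) (walls : List (List Int)) (out : Int) : Prop := out = manhatan_with_bonus_and_cost_alt size state destination items walls
instance (size : Int × Int) (state : (Int × Int) × List Int) (destination : Int × Int) (items : List (List Int)) (walls : List (List Int)) (out : Int) : Decidable (Spec_manhatan_with_bonus_and_cost size state destination items walls out) := by unfold Spec_manhatan_with_bonus_and_cost; infer_instance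

-- ===== CLAIM (what is proved, stated in full; the proofs are below) =====
def Claim_equal_manhatan_with_bonus_and_cost : Prop := ∀ (size : Int × Int) (state : (Int × Int) × List Int) (destination : Int × Int) (items : List (List Int)) (walls : List (List Int)), Dom_manhatan_with_bonus_and_cost size state destination items walls → Pre_manhatan_with_bonus_and_cost size state destination items walls → Spec_manhatan_with_bonus_and_cost size state destination items walls (manhatan_with_bonus_and_cost size state destination items walls)

-- ===== LEMMAS AND PROOFS =====

theorem pvWitness_ok :
    Dom_manhatan_with_bonus_and_cost (pvWitness_manhatan_with_bonus_and_cost.1) (pvWitness_manhatan_with_bonus_and_cost.2.1) (pvWitness_manhatan_with_bonus_and_cost.2.2.1) (pvWitness_manhatan_with_bonus_and_cost.2.2.2.1) (pvWitness_manhatan_with_bonus_and_cost.2.2.2.2) ∧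
    Pre_manhatan_with_bonus_and_cost (pvWitness_manhatan_with_bonus_and_cost.1) (pvWitness_manhatan_with_bonus_and_cost.2.1) (pvWitness_manhatan_with_bonus_and_cost.2.2.1) (pvWitness_manhatan_with_bonus_and_cost.2.2.2.1) (pvWitness_manhatan_with_bonus_and_cost.2.2.2.2) := by
  decide

-- A's per-cell term: with b the extracted bit, max 0 (v*b - d1 - d2) is the
-- clipped surplus when the bit is set and 0 when it is not
theorem pvBit_cases (m j : Int) : pvBit m j = 0 ∨ pvBit m j = 1 := by
  unfold pvBit
  rw [PySem.Int.band_one]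
  have h0 := PySem.Int.mod_nonneg (m >>> j.toNat) (by norm_num : (0:Int) < 2)
  have h2 := PySem.Int.mod_lt (m >>> j.toNat) (by norm_num : (0:Int) < 2)
  omega

theorem pv_cell (v m j d1 d2 : Int) (h1 : 0 ≤ d1) (h2 : 0 ≤ d2) :
    max 0 (v * pvBit m j - d1 - d2)
      = (if pvBit m j != 0 then max (v - d1 - d2) 0 else 0) := by
  rcases pvBit_cases m j with h | h
  · rw [h]; simp; omega
  · rw [h]; simp [max_comm]

-- a sum of guarded terms is the sum over the filtered list (the comprehension's shape)
theorem pv_sum_if_filter {α : Type} (l : List α) (p : α → Bool) (f : α → Int) :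
    (l.map (fun x => if p x then f x else 0)).sum = ((l.filter p).map f).sum := by
  induction l with
  | nil => simp
  | cons a t ih => by_cases h : p a <;> simp [h, ih]

-- summing a flatMap row by row
theorem pv_sum_flatMap {α : Type} (l : List α) (g : α → List Int) :
    (l.flatMap g).sum = (l.map (fun x => (g x).sum)).sum := by
  induction l with
  | nil => simp
  | cons a t ih => simp [List.flatMap_cons, ih]

-- the early-exit loop on a descending list sums the clipped surpluses
theorem pvSumPos_eq (l : List Int) (hp : l.Pairwise (fun a b => b ≤ a)) :
    ∀ acc, pvSumPos l acc = acc + (l.map (fun s => max s 0)).sum := by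
  induction l with
  | nil => intro acc; simp [pvSumPos]
  | cons s t ih =>
    intro acc
    rcases List.pairwise_cons.mp hp with ⟨hhd, htl⟩
    rw [pvSumPos]
    by_cases hs : s ≤ 0
    · rw [if_pos hs]
      have hz : ((s :: t).map (fun s => max s 0)).sum = 0 := by
        apply List.sum_eq_zero
        intro x hx
        rcases List.mem_map.mp hx with ⟨y, hy, rfl⟩
        rcases List.mem_cons.mp hy with rfl | hy'
        · omega
        · have := hhd y hy'; omega
      rw [hz]; omega
    · rw [if_neg hs, ih htl (acc + s), List.map_cons, List.sum_cons]
      have : max s 0 = s := by omega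
      omega

theorem pv_main (size : Int × Int) (state : (Int × Int) × List Int) (destination : Int × Int) (items : List (List Int)) (walls : List (List Int)) :
    manhatan_with_bonus_and_cost size state destination items walls
      = manhatan_with_bonus_and_cost_alt size state destination items walls := by
  rw [manhatan_with_bonus_and_cost, manhatan_with_bonus_and_cost_alt]
  by_cases h : state.1.1 = destination.1 ∧ state.1.2 = destination.2
  · rw [if_pos h, if_pos h]
  · rw [if_neg h, if_neg h]
    set r := state.1.1
    set c := state.1.2
    set surpluses : List Int :=
      (PySem.List.pyRange 0 size.1 1).flatMap (fun i =>
        ((PySem.List.pyRange 0 size.2 1).filter (fun j =>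
            pvBit (PySem.List.pyGetD state.2 i 0) j != 0)).map (fun j =>
          PySem.List.pyGetD (PySem.List.pyGetD items i []) j 0 - |i - r| - |j - c|)) with hS
    -- B's loop over the sorted list sums the clipped surpluses of `surpluses`
    have hB : pvSumPos (PySem.List.sorted surpluses (fun x => x) true) 0
        = ((surpluses.map (fun s => max s 0)).sum) := by
      rw [pvSumPos_eq _ (PySem.List.sorted_pairwise_rev surpluses (fun x => x)) 0]
      rw [zero_add]
      exact List.Perm.sum_eq
        (List.Perm.map _ (PySem.List.sorted_perm surpluses (fun x => x) true))
    -- A's double fold equals the same sum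
    have hA : (PySem.List.pyRange 0 size.1 1).foldl (fun acc i =>
          (PySem.List.pyRange 0 size.2 1).foldl (fun acc2 j =>
            acc2 + max 0 (PySem.List.pyGetD (PySem.List.pyGetD items i []) j 0 *
                pvBit (PySem.List.pyGetD state.2 i 0) j
              - |i - r| - |j - c|)) acc) 0
        = (surpluses.map (fun s => max s 0)).sum := by
      have hrow : (fun (acc i : Int) =>
            (PySem.List.pyRange 0 size.2 1).foldl (fun acc2 j =>
              acc2 + max 0 (PySem.List.pyGetD (PySem.List.pyGetD items i []) j 0 *
                  pvBit (PySem.List.pyGetD state.2 i 0) j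
                - |i - r| - |j - c|)) acc)
          = (fun acc i => acc +
              ((((PySem.List.pyRange 0 size.2 1).filter (fun j =>
                  pvBit (PySem.List.pyGetD state.2 i 0) j != 0)).map (fun j =>
                PySem.List.pyGetD (PySem.List.pyGetD items i []) j 0 - |i - r| - |j - c|)).map
                  (fun s => max s 0)).sum) := by
        funext acc i
        rw [PySem.List.foldl_add]
        congr 1
        rw [List.map_map]
        rw [← pv_sum_if_filter]
        refine congrArg List.sum (List.map_congr_left ?_)
        intro j hj
        simp only [Function.comp]
        exact pv_cell _ _ _ _ _ (abs_nonneg _) (abs_nonneg _)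
      rw [hrow, PySem.List.foldl_add, zero_add, hS, List.map_flatMap, pv_sum_flatMap]
    simp only [hA, ← hS, hB]
    ring

-- ===== VERDICT (by name: the statement is the Claim_ definition above) =====
theorem manhatan_with_bonus_and_cost_spec : Claim_equal_manhatan_with_bonus_and_cost := by
  intro size state destination items walls _ _
  unfold Spec_manhatan_with_bonus_and_cost
  exact pv_main size state destination items walls
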